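-- pv_equiv track=rewrite | github.com/alex2awesome/public-comment-webpage | scripts/autometrics/autometrics/metrics/reference_based/CharCut.py | _residual_diff
-- ===== SOURCE A (Python) =====
-- def _residual_diff(mask):
--     """
--     Factor successive 0's from a mask.
--     Returns list of pairs: (start position, length)
--     """
--     buf = []
--     for i, elt in enumerate(mask):
--         if elt:
--             buf.append(i)
--         elif buf:
--             yield buf[0], len(buf)
--             buf = []
--     if buf:
--         yield buf[0], len(buf)
-- ===== SOURCE B (Python) =====
-- def _residual_diff(mask):
--     """
--     Factor successive 0's from a mask.
--     Returns list of pairs: (start position, length)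
--     """
--     m = [bool(x) for x in mask]
--     n = len(m)
--     # Staged passes: detect run boundaries by neighbour comparison, then pair them up.
--     starts = [i for i in range(n) if m[i] and (i == 0 or not m[i - 1])]
--     ends = [i for i in range(n) if m[i] and (i == n - 1 or not m[i + 1])]
--     for s, e in zip(starts, ends):
--         yield s, e - s + 1
-- ===== Notes on version B (the rewrite author's own statement) =====
-- stated objective: alternative
-- what changed: Replaced the single-pass manual index-buffer accumulation with staged passes: boolean-ize the mask, detect run starts and run ends separately by neighbour comparison over the index range, then zip the two boundary lists into (start, end-start+1) pairs.
import Mathlib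
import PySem

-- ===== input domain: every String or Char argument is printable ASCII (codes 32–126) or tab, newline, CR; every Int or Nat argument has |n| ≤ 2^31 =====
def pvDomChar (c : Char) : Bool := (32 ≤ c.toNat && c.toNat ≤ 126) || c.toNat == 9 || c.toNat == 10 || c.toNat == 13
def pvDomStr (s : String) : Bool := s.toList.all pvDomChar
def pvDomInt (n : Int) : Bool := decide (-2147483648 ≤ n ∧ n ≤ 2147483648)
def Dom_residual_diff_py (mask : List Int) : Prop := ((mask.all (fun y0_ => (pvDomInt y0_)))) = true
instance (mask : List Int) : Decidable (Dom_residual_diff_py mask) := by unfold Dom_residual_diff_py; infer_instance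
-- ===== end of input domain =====

-- B replaces A's single accumulator pass by staged boundary-detection passes (run starts, run ends) zipped together (alternative).

-- ===== PORT A =====
-- A's loop over enumerate(mask) with the buffer of indices `buf`; a yield is a cons.
def residualDiffGoA : List (Int × Int) → List Int → List (Int × Int)
  | [], buf => if buf.isEmpty then [] else [(buf.headI, (buf.length : Int))]
  | (i, elt) :: rest, buf =>
    if elt ≠ 0 then residualDiffGoA rest (buf ++ [i])
    else if buf.isEmpty then residualDiffGoA rest buf
    else (buf.headI, (buf.length : Int)) :: residualDiffGoA rest []

def residual_diff_py (mask : List Int) : List (Int × Int) :=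
  residualDiffGoA (PySem.List.enumerate mask) []

-- ===== PORT B =====
-- Source B: m = [bool(x) for x in mask]; starts/ends = boundary-detection list comprehensions
-- over range(n); zip them and yield (s, e - s + 1).  Every m[i] with i from range(n) is in
-- range, and m[i-1] / m[i+1] are short-circuit-guarded, so List.getD is exact here.
def residual_diff_py_alt (mask : List Int) : List (Int × Int) :=
  let m : List Bool := mask.map (fun x => decide (x ≠ 0))
  let n : Nat := m.length
  let starts : List Nat :=
    (List.range n).filter (fun i => m.getD i false && (i == 0 || !(m.getD (i - 1) false)))
  let ends : List Nat :=
    (List.range n).filter (fun i => m.getD i false && (i == n - 1 || !(m.getD (i + 1) false)))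
  (starts.zip ends).map (fun p => ((p.1 : Int), (p.2 : Int) - (p.1 : Int) + 1))

-- ===== PRECONDITION & SPEC =====
def Spec_residual_diff_py (mask : List Int) (out : List (Int × Int)) : Prop := out = residual_diff_py_alt mask
instance (mask : List Int) (out : List (Int × Int)) : Decidable (Spec_residual_diff_py mask out) := by unfold Spec_residual_diff_py; infer_instance

-- ===== CLAIM (what is proved, stated in full; the proofs are below) =====
def Claim_equal_residual_diff_py : Prop := ∀ (mask : List Int), Dom_residual_diff_py mask → Spec_residual_diff_py mask (residual_diff_py mask)

-- ===== LEMMAS AND PROOFS =====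

-- structural characterisations of B's two boundary comprehensions
def localStarts : Bool → List Bool → List Nat
  | _, [] => []
  | prev, b :: bs => (if b && !prev then [0] else []) ++ (localStarts b bs).map (· + 1)

def localEnds : List Bool → List Nat
  | [] => []
  | b :: bs => (if b && !(bs.headD false) then [0] else []) ++ (localEnds bs).map (· + 1)

lemma starts_filter_eq (m : List Bool) (prev : Bool) :
    (List.range m.length).filter
        (fun i => m.getD i false && ((i == 0 && !prev) || (!(i == 0) && !(m.getD (i - 1) false))))
      = localStarts prev m := by
  induction m generalizing prev with
  | nil => simp [localStarts]
  | cons b bs ih =>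
    rw [List.length_cons, List.range_succ_eq_map, List.filter_cons, List.filter_map]
    have hp : ((fun i => (b :: bs).getD i false &&
          ((i == 0 && !prev) || (!(i == 0) && !((b :: bs).getD (i - 1) false)))) ∘ Nat.succ)
        = (fun i => bs.getD i false && ((i == 0 && !b) || (!(i == 0) && !(bs.getD (i - 1) false)))) := by
      funext i
      cases i <;> simp [List.getD]
    rw [hp, ih b]
    cases b <;> cases prev <;> simp [localStarts, List.getD]

lemma ends_filter_eq (m : List Bool) :
    (List.range m.length).filter (fun i => m.getD i false && !(m.getD (i + 1) false))
      = localEnds m := by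
  induction m with
  | nil => simp [localEnds]
  | cons b bs ih =>
    rw [List.length_cons, List.range_succ_eq_map, List.filter_cons, List.filter_map]
    have hp : ((fun i => (b :: bs).getD i false && !((b :: bs).getD (i + 1) false)) ∘ Nat.succ)
        = (fun i => bs.getD i false && !(bs.getD (i + 1) false)) := by
      funext i; simp [List.getD]
    rw [hp, ih]
    cases bs with
    | nil => cases b <;> simp [localEnds, List.getD]
    | cons c cs =>
      cases b <;> cases c <;>
        simp [localEnds, List.getD, List.map_map, Function.comp_def]

lemma alt_starts_eq (m : List Bool) :
    (List.range m.length).filter (fun i => m.getD i false && (i == 0 || !(m.getD (i - 1) false)))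
      = localStarts false m := by
  rw [← starts_filter_eq m false]
  apply List.filter_congr
  intro i _
  cases i <;> simp

lemma alt_ends_eq (m : List Bool) :
    (List.range m.length).filter
        (fun i => m.getD i false && (i == m.length - 1 || !(m.getD (i + 1) false)))
      = localEnds m := by
  rw [← ends_filter_eq m]
  apply List.filter_congr
  intro i hi
  rw [List.mem_range] at hi
  by_cases h : i = m.length - 1
  · subst h
    have h2 : m.getD (m.length - 1 + 1) false = false := by
      apply List.getD_eq_default
      omega
    simp [List.getD] at h2
    simp [h2]
  · rw [show (i == m.length - 1) = false from by simpa using h]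
    simp

lemma localStarts_run (bs : List Bool) :
    localStarts true bs = (localStarts false (bs.dropWhile id)).map (· + (bs.takeWhile id).length) := by
  induction bs with
  | nil => simp [localStarts]
  | cons b bs ih =>
    cases b with
    | false => simp [localStarts, List.dropWhile, List.takeWhile]
    | true =>
      simp only [localStarts, List.dropWhile, List.takeWhile, id]
      rw [ih]
      simp [List.map_map, Function.comp_def, Nat.add_assoc, Nat.add_comm 1]

lemma localEnds_run (bs : List Bool) :
    localEnds (true :: bs)
      = (bs.takeWhile id).length ::
          (localEnds (bs.dropWhile id)).map (· + ((bs.takeWhile id).length + 1)) := by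
  induction bs with
  | nil => simp [localEnds]
  | cons b bs ih =>
    cases b with
    | false => simp [localEnds, List.dropWhile, List.takeWhile]
    | true =>
      have h1 : localEnds (true :: true :: bs) = (localEnds (true :: bs)).map (· + 1) := by
        simp [localEnds]
      rw [h1, ih]
      simp [List.map_map, Function.comp_def, List.takeWhile, List.dropWhile, Nat.add_assoc]


lemma enumerate_takeWhile (q : Int → Bool) (xs : List Int) (s : Int) :
    (PySem.List.enumerate xs s).takeWhile (fun p => q p.2)
      = PySem.List.enumerate (xs.takeWhile q) s := by
  induction xs generalizing s with
  | nil => simp [PySem.List.enumerate_nil]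
  | cons x xs ih =>
    rw [PySem.List.enumerate_cons, List.takeWhile_cons, List.takeWhile_cons]
    cases hq : q x <;> simp [PySem.List.enumerate_nil, PySem.List.enumerate_cons, hq, ih]

lemma enumerate_dropWhile (q : Int → Bool) (xs : List Int) (s : Int) :
    (PySem.List.enumerate xs s).dropWhile (fun p => q p.2)
      = PySem.List.enumerate (xs.dropWhile q) (s + (xs.takeWhile q).length) := by
  induction xs generalizing s with
  | nil => simp [PySem.List.enumerate_nil]
  | cons x xs ih =>
    rw [PySem.List.enumerate_cons, List.dropWhile_cons]
    cases hq : q x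
    · simp [hq, PySem.List.enumerate_cons]
    · simp only [hq, if_pos, List.dropWhile, List.takeWhile_cons, hq, ite_true]
      rw [ih]
      simp [List.length_cons]
      ring_nf

lemma localStarts_false (prev : Bool) (ms : List Bool) :
    localStarts prev (false :: ms) = (localStarts false ms).map (· + 1) := by
  simp [localStarts]

lemma localEnds_false (ms : List Bool) :
    localEnds (false :: ms) = (localEnds ms).map (· + 1) := by
  cases ms <;> simp [localEnds]

lemma localStarts_true (ms : List Bool) :
    localStarts false (true :: ms) = 0 :: (localStarts true ms).map (· + 1) := by
  simp [localStarts]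

lemma goA_buf (l : List (Int × Int)) (b : Int) (bs : List Int) :
    residualDiffGoA l (b :: bs) =
      ((b :: bs).headI, (((b :: bs).length + (l.takeWhile (fun p => decide (p.2 ≠ 0) == true)).length : Nat) : Int)) ::
        residualDiffGoA (l.dropWhile (fun p => decide (p.2 ≠ 0) == true)) [] := by
  induction l generalizing bs with
  | nil => simp [residualDiffGoA]
  | cons p rest ih =>
    obtain ⟨i, elt⟩ := p
    by_cases h : elt = 0
    · subst h
      simp [residualDiffGoA, List.takeWhile, List.dropWhile]
    · have step : residualDiffGoA ((i, elt) :: rest) (b :: bs) =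
          residualDiffGoA rest (b :: (bs ++ [i])) := by
        simp [residualDiffGoA, h]
      rw [step, ih (bs ++ [i])]
      simp [List.takeWhile, List.dropWhile, h, List.headI]
      omega

lemma goA_eq_zip (mask : List Int) (s : Int) :
    residualDiffGoA (PySem.List.enumerate mask s) [] =
      ((localStarts false (mask.map (fun x => decide (x ≠ 0)))).zip
          (localEnds (mask.map (fun x => decide (x ≠ 0))))).map
        (fun p => (s + (p.1 : Int), (p.2 : Int) - (p.1 : Int) + 1)) := by
  induction hn : mask.length using Nat.strong_induction_on generalizing mask s with
  | _ n ih =>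
    match mask with
    | [] => simp [PySem.List.enumerate_nil, residualDiffGoA, localStarts, localEnds]
    | x :: xs =>
      by_cases h : x = 0
      · subst h
        have hstep : residualDiffGoA (PySem.List.enumerate (0 :: xs) s) [] =
            residualDiffGoA (PySem.List.enumerate xs (s + 1)) [] := by
          rw [PySem.List.enumerate_cons]
          simp [residualDiffGoA]
        have hlt : xs.length < n := by simp at hn; omega
        rw [hstep, ih _ hlt xs (s + 1) rfl]
        simp only [List.map_cons, show (decide ((0:ℤ) ≠ 0)) = false from rfl]
        rw [localStarts_false, localEnds_false, List.zip_map, List.map_map]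
        apply List.map_congr_left
        intro p _
        simp only [Prod.map, Function.comp_def]
        push_cast
        refine Prod.ext ?_ ?_ <;> simp <;> ring
      · have hx : decide (x ≠ 0) = true := by simp [h]
        have hstep : residualDiffGoA (PySem.List.enumerate (x :: xs) s) [] =
            residualDiffGoA (PySem.List.enumerate xs (s + 1)) [s] := by
          rw [PySem.List.enumerate_cons]
          simp [residualDiffGoA, h]
        rw [hstep, goA_buf _ s []]
        simp only [beq_true]
        rw [enumerate_takeWhile (fun y => decide (y ≠ 0)) xs (s + 1),
          enumerate_dropWhile (fun y => decide (y ≠ 0)) xs (s + 1)]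
        have hlt : (xs.dropWhile (fun y => decide (y ≠ 0))).length < n := by
          have := List.length_dropWhile_le (fun y => decide (y ≠ 0)) xs
          simp at hn; omega
        rw [ih _ hlt _ (s + 1 + ((xs.takeWhile (fun y => decide (y ≠ 0))).length : Int)) rfl]
        simp only [List.map_cons, hx]
        rw [localStarts_true, localStarts_run, localEnds_run]
        have htk : (List.map (fun x => decide (x ≠ 0)) xs).takeWhile id
            = (xs.takeWhile (fun y => decide (y ≠ 0))).map (fun x => decide (x ≠ 0)) := by
          rw [List.takeWhile_map]; rfl
        have hdk : (List.map (fun x => decide (x ≠ 0)) xs).dropWhile id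
            = (xs.dropWhile (fun y => decide (y ≠ 0))).map (fun x => decide (x ≠ 0)) := by
          rw [List.dropWhile_map]; rfl
        rw [htk, hdk]
        simp only [List.length_map, PySem.List.length_enumerate]
        rw [List.zip_cons_cons, List.map_cons, List.map_map, List.zip_map, List.map_map]
        congr 1
        · refine Prod.ext ?_ ?_ <;> simp [List.headI] <;> push_cast <;> ring
        · apply List.map_congr_left
          intro p _
          simp only [Prod.map, Function.comp_def]
          refine Prod.ext ?_ ?_ <;> simp <;> push_cast <;> ring

-- ===== VERDICT (by name: the statement is the Claim_ definition above) =====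
theorem residual_diff_py_spec : Claim_equal_residual_diff_py := by
  intro mask _
  unfold Spec_residual_diff_py residual_diff_py residual_diff_py_alt
  rw [goA_eq_zip mask 0]
  dsimp only
  have hs := alt_starts_eq (mask.map (fun x => decide (x ≠ 0)))
  have he := alt_ends_eq (mask.map (fun x => decide (x ≠ 0)))
  rw [hs, he]
  exact List.map_congr_left (fun p _ => by simp)
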